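-- pv_equiv track=rewrite | github.com/DavidKN10/DSA-resources | Exams/Final Exam/p2_answers.py | schedule_slots
-- ===== SOURCE A (Python) =====
-- def schedule_slots(d: dict[str, set[str]]) -> dict[str, set[str]]:
--     result = {}
--
--     # Sort the dates based on the number of available persons in descending order
--     sorted_dates = sorted(d.keys(), key=lambda x: (-len(d[x]), x))
--
--     assigned_persons = set()
--
--     for date in sorted_dates:
--         available_persons = d[date] - assigned_persons
--
--         if available_persons:
--             result[date] = available_persons
--             assigned_persons.update(available_persons)
--
--     return result
-- ===== SOURCE B (Python) =====
-- def schedule_slots(d: dict[str, set[str]]) -> dict[str, set[str]]: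
--     def key(x):
--         return (-len(d[x]), x)
--
--     # One pass over the data: for every person remember the best date containing them,
--     # where 'best' minimizes (-size of that date's set, date name).
--     best = {}
--     for date, persons in d.items():
--         for p in persons:
--             cur = best.get(p)
--             if cur is None or key(date) < key(cur):
--                 best[p] = date
--
--     # Emit each date's winners in key order, skipping dates that won nobody.
--     result = {}
--     for date in sorted(d, key=key):
--         group = {p for p in d[date] if best.get(p) == date}
--         if group:
--             result[date] = group
--     return result
-- ===== Notes on version B (the rewrite author's own statement) =====
-- stated objective: alternative
-- what changed: Instead of a greedy loop that walks the sorted dates maintaining a growing 'assigned' set and taking set differences, B makes one stateless pass computing for every person the argmin date under the key (-size, name) and then emits each date's winners by a membership test against that map.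
import Mathlib
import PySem

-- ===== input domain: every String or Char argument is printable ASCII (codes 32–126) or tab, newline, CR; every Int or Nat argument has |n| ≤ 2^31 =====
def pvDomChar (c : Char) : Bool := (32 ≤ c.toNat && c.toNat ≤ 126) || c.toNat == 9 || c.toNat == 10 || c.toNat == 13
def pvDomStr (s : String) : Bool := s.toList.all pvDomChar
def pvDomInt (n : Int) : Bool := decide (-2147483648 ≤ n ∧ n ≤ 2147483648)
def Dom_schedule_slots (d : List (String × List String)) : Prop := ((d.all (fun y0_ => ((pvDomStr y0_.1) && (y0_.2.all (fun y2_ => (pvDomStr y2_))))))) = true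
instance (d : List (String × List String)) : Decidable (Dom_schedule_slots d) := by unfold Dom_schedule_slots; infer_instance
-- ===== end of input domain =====

-- B replaces A's greedy walk over the sorted dates (with a growing 'assigned' set and
-- set differences) by a stateless per-person argmin map; objective: alternative decomposition.

-- Marshalling shared by both ports (the Python argument is a dict[str, set[str]]):
def pvDict (d : List (String × List String)) : PySem.Dict String (List String) :=
  PySem.Dict.ofList (d.map (fun kv => (kv.1, PySem.Set.ofList kv.2)))

-- the sort key 'lambda x: (-len(d[x]), x)' (first component; second is the identity)
def pvKey (d : List (String × List String)) (x : String) : Int :=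
  -(PySem.Set.len ((pvDict d).getD x []))

-- ===== PORT A =====
def pvAStep (dd : PySem.Dict String (List String))
    (st : PySem.Dict String (List String) × PySem.Set String) (date : String) :
    PySem.Dict String (List String) × PySem.Set String :=
  let available_persons := PySem.Set.diff (dd.getD date []) st.2
  if available_persons ≠ [] then
    (st.1.insert date available_persons, PySem.Set.update st.2 available_persons)
  else st

def schedule_slots (d : List (String × List String)) : List (String × List String) :=
  let dd := pvDict d
  let sorted_dates := PySem.List.sorted2 dd.keys (pvKey d) (fun x => x) false
  (sorted_dates.foldl (pvAStep dd) (PySem.Dict.empty, PySem.Set.empty)).1.items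

-- ===== PORT B =====
-- one person's update of the best-date-so-far map ('if cur is None or key(date) < key(cur)')
def pvAssignStep (k : String → Int) (best : PySem.Dict String String) (date p : String) :
    PySem.Dict String String :=
  match best.get? p with
  | none => best.insert p date
  | some cur =>
      if k date < k cur ∨ (k date = k cur ∧ date < cur) then best.insert p date else best

-- emit one date's winners ('group = {p for p in d[date] if best.get(p) == date}')
def pvEmitStep (dd : PySem.Dict String (List String)) (best : PySem.Dict String String)
    (res : PySem.Dict String (List String)) (date : String) :
    PySem.Dict String (List String) :=
  let group := (dd.getD date []).filter (fun p => best.get? p == some date)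
  if group ≠ [] then res.insert date group else res

def schedule_slots_alt (d : List (String × List String)) : List (String × List String) :=
  let dd := pvDict d
  let best := dd.items.foldl
      (fun b kv => kv.2.foldl (fun b p => pvAssignStep (pvKey d) b kv.1 p) b)
      PySem.Dict.empty
  ((PySem.List.sorted2 dd.keys (pvKey d) (fun x => x) false).foldl
      (pvEmitStep dd best) PySem.Dict.empty).items

-- ===== PRECONDITION & SPEC =====
def Spec_schedule_slots (d : List (String × List String)) (out : List (String × List String)) : Prop := out = schedule_slots_alt d
instance (d : List (String × List String)) (out : List (String × List String)) : Decidable (Spec_schedule_slots d out) := by unfold Spec_schedule_slots; infer_instance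

-- ===== CLAIM (what is proved, stated in full; the proofs are below) =====
def Claim_equal_schedule_slots : Prop := ∀ (d : List (String × List String)), Dom_schedule_slots d → Spec_schedule_slots d (schedule_slots d)

-- ===== LEMMAS AND PROOFS =====

-- the strict and non-strict lexicographic orders Python's tuple comparison induces on (k x, x)
abbrev pvLt (k : String → Int) (x y : String) : Prop := k x < k y ∨ (k x = k y ∧ x < y)
abbrev pvLe (k : String → Int) (x y : String) : Prop := k x < k y ∨ (k x = k y ∧ x ≤ y)

theorem pvLe_refl (k : String → Int) (x : String) : pvLe k x x := Or.inr ⟨rfl, le_refl x⟩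

theorem pvLt_to_pvLe {k : String → Int} {x y : String} (h : pvLt k x y) : pvLe k x y := by
  rcases h with h | ⟨h1, h2⟩
  · exact Or.inl h
  · exact Or.inr ⟨h1, le_of_lt h2⟩

theorem pvLe_trans {k : String → Int} {x y z : String} (h1 : pvLe k x y) (h2 : pvLe k y z) :
    pvLe k x z := by
  rcases h1 with h1 | ⟨h1, h1'⟩ <;> rcases h2 with h2 | ⟨h2, h2'⟩
  · exact Or.inl (lt_trans h1 h2)
  · exact Or.inl (h2 ▸ h1)
  · exact Or.inl (h1 ▸ h2)
  · exact Or.inr ⟨h1.trans h2, le_trans h1' h2'⟩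

theorem not_pvLt_iff {k : String → Int} {x y : String} : ¬ pvLt k x y ↔ pvLe k y x := by
  constructor
  · intro h
    by_cases h1 : k x < k y
    · exact absurd (Or.inl h1) h
    · by_cases h2 : k y < k x
      · exact Or.inl h2
      · have he : k y = k x := le_antisymm (not_lt.mp h1) (not_lt.mp h2)
        refine Or.inr ⟨he, ?_⟩
        by_cases h3 : x < y
        · exact absurd (Or.inr ⟨he.symm, h3⟩) h
        · exact not_lt.mp h3
  · rintro (h | ⟨h1, h2⟩) (h' | ⟨h1', h2'⟩)
    · exact absurd h' (not_lt.mpr (le_of_lt h))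
    · exact absurd h1' (ne_of_gt h)
    · exact absurd h' (not_lt.mpr (le_of_eq h1))
    · exact absurd h2' (not_lt.mpr h2)

theorem pvLt_pvLe_asymm {k : String → Int} {x y : String} (h : pvLt k x y) (h' : pvLe k y x) :
    False := (not_pvLt_iff.mpr h') h

theorem pvLt_of_pvLe_ne {k : String → Int} {x y : String} (h : pvLe k x y) (hne : x ≠ y) :
    pvLt k x y := by
  rcases h with h | ⟨h1, h2⟩
  · exact Or.inl h
  · exact Or.inr ⟨h1, lt_of_le_of_ne h2 hne⟩

theorem pvLt_irrefl {k : String → Int} {x : String} (h : pvLt k x x) : False :=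
  pvLt_pvLe_asymm h (pvLe_refl k x)

-- the boolean comparator sorted2 uses is exactly pvLt
theorem pvBefore_iff (k : String → Int) (a b : String) :
    (decide (k a < k b) || (!decide (k b < k a) && decide (a < b))) = true ↔ pvLt k a b := by
  simp only [Bool.or_eq_true, Bool.and_eq_true, Bool.not_eq_true', decide_eq_true_eq,
    decide_eq_false_iff_not]
  constructor
  · rintro (h | ⟨h1, h2⟩)
    · exact Or.inl h
    · by_cases h3 : k a < k b
      · exact Or.inl h3
      · exact Or.inr ⟨le_antisymm (not_lt.mp h1) (not_lt.mp h3), h2⟩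
  · rintro (h | ⟨h1, h2⟩)
    · exact Or.inl h
    · exact Or.inr ⟨not_lt.mpr (le_of_eq h1), h2⟩

theorem insertBy_pairwise_pvLe (k : String → Int) (x : String) :
    ∀ (ys : List String), ys.Pairwise (pvLe k) →
      (PySem.List.insertBy (fun a b => decide (k a < k b) || (!decide (k b < k a) && decide (a < b)))
        x ys).Pairwise (pvLe k) := by
  intro ys
  induction ys with
  | nil => intro _; simp [PySem.List.insertBy]
  | cons y ys ih =>
    intro hp
    rw [List.pairwise_cons] at hp
    rw [PySem.List.insertBy.eq_2]
    by_cases hb : (decide (k x < k y) || (!decide (k y < k x) && decide (x < y))) = true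
    · rw [if_pos hb]
      have hxy : pvLe k x y := pvLt_to_pvLe ((pvBefore_iff k x y).mp hb)
      refine List.pairwise_cons.mpr ⟨?_, List.pairwise_cons.mpr hp⟩
      intro z hz
      rcases List.mem_cons.mp hz with rfl | hz
      · exact hxy
      · exact pvLe_trans hxy (hp.1 z hz)
    · rw [if_neg hb]
      have hyx : pvLe k y x := by
        have := (not_congr (pvBefore_iff k x y)).mp (by simpa using hb)
        exact not_pvLt_iff.mp this
      refine List.pairwise_cons.mpr ⟨?_, ih hp.2⟩
      intro z hz
      rcases (PySem.List.insertBy_mem_iff _ _ _ _).mp hz with rfl | hz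
      · exact hyx
      · exact hp.1 z hz

theorem foldl_insertBy_pairwise_pvLe (k : String → Int) :
    ∀ (xs acc : List String), acc.Pairwise (pvLe k) →
      (xs.foldl (fun acc x =>
          PySem.List.insertBy
            (fun a b => decide (k a < k b) || (!decide (k b < k a) && decide (a < b))) x acc)
        acc).Pairwise (pvLe k) := by
  intro xs
  induction xs with
  | nil => intro acc h; simpa using h
  | cons x xs ih =>
    intro acc h
    exact ih _ (insertBy_pairwise_pvLe k x acc h)

theorem sorted2_pairwise_pvLe (k : String → Int) (xs : List String) :
    (PySem.List.sorted2 xs k (fun x => x) false).Pairwise (pvLe k) := by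
  show (xs.foldl (fun acc x =>
      PySem.List.insertBy
        (fun a b => decide (k a < k b) || (!decide (k b < k a) && decide (a < b))) x acc)
    []).Pairwise (pvLe k)
  exact foldl_insertBy_pairwise_pvLe k xs [] (by simp)

theorem sorted2_pairwise_pvLt (k : String → Int) (xs : List String) (hnd : xs.Nodup) :
    (PySem.List.sorted2 xs k (fun x => x) false).Pairwise (pvLt k) := by
  have h1 := sorted2_pairwise_pvLe k xs
  have h2 : (PySem.List.sorted2 xs k (fun x => x) false).Nodup :=
    (PySem.List.sorted2_perm xs k (fun x => x) false).symm.nodup hnd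
  exact (h1.and h2).imp (fun {a b} h => pvLt_of_pvLe_ne h.1 h.2)

-- the inner loop 'for p in persons: …' of B, pointwise.
-- pvOneStep is the effect of one comparison on one person's stored best date.
def pvOneStep (k : String → Int) (date : String) (o : Option String) : Option String :=
  match o with
  | none => some date
  | some cur => if k date < k cur ∨ (k date = k cur ∧ date < cur) then some date else some cur

theorem pvOneStep_idem (k : String → Int) (date : String) (o : Option String) :
    pvOneStep k date (pvOneStep k date o) = pvOneStep k date o := by
  cases o with
  | none =>
    show (if k date < k date ∨ (k date = k date ∧ date < date)
        then some date else some date) = some date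
    split_ifs <;> rfl
  | some cur =>
    show pvOneStep k date (if k date < k cur ∨ (k date = k cur ∧ date < cur)
        then some date else some cur)
      = (if k date < k cur ∨ (k date = k cur ∧ date < cur) then some date else some cur)
    by_cases hlt : k date < k cur ∨ (k date = k cur ∧ date < cur)
    · rw [if_pos hlt]
      show (if k date < k date ∨ (k date = k date ∧ date < date)
          then some date else some date) = some date
      split_ifs <;> rfl
    · rw [if_neg hlt]
      show (if k date < k cur ∨ (k date = k cur ∧ date < cur)
          then some date else some cur) = some cur
      rw [if_neg hlt]

theorem pvAssignStep_get?_self (k : String → Int) (b : PySem.Dict String String)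
    (date q : String) : (pvAssignStep k b date q).get? q = pvOneStep k date (b.get? q) := by
  unfold pvAssignStep pvOneStep
  cases hb : b.get? q with
  | none => exact PySem.Dict.get?_insert_self b q date
  | some cur =>
    show (if k date < k cur ∨ (k date = k cur ∧ date < cur) then b.insert q date else b).get? q
      = (if k date < k cur ∨ (k date = k cur ∧ date < cur) then some date else some cur)
    by_cases hlt : k date < k cur ∨ (k date = k cur ∧ date < cur)
    · rw [if_pos hlt, if_pos hlt]
      exact PySem.Dict.get?_insert_self b q date
    · rw [if_neg hlt, if_neg hlt]
      exact hb

theorem pvAssignStep_get?_ne (k : String → Int) (b : PySem.Dict String String)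
    (date p q : String) (hqp : q ≠ p) :
    (pvAssignStep k b date p).get? q = b.get? q := by
  unfold pvAssignStep
  cases hb : b.get? p with
  | none => exact PySem.Dict.get?_insert_of_ne b date hqp
  | some cur =>
    show (if k date < k cur ∨ (k date = k cur ∧ date < cur) then b.insert p date else b).get? q
      = b.get? q
    by_cases hlt : k date < k cur ∨ (k date = k cur ∧ date < cur)
    · rw [if_pos hlt]
      exact PySem.Dict.get?_insert_of_ne b date hqp
    · rw [if_neg hlt]

theorem assign_fold_get? (k : String → Int) (date : String) :
    ∀ (v : List String) (b : PySem.Dict String String) (q : String),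
      ((v.foldl (fun b p => pvAssignStep k b date p) b).get? q)
        = if q ∈ v then pvOneStep k date (b.get? q) else b.get? q := by
  intro v
  induction v with
  | nil => intro b q; simp
  | cons p v ih =>
    intro b q
    rw [List.foldl_cons, ih]
    by_cases hqp : q = p
    · subst hqp
      rw [pvAssignStep_get?_self]
      by_cases hqv : q ∈ v
      · rw [if_pos hqv, if_pos (List.mem_cons_self), pvOneStep_idem]
      · rw [if_neg hqv, if_pos (List.mem_cons_self)]
    · have hmem : (q ∈ p :: v) ↔ (q ∈ v) := by simp [List.mem_cons, hqp]
      rw [pvAssignStep_get?_ne k b date p q hqp]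
      by_cases hqv : q ∈ v
      · rw [if_pos hqv, if_pos (hmem.mpr hqv)]
      · rw [if_neg hqv, if_neg (fun h => hqv (hmem.mp h))]

-- 'x is the key-minimal date of l containing q'
def pvBestOf (k : String → Int) (l : List (String × List String)) (q x : String) : Prop :=
  (∃ w, (x, w) ∈ l ∧ q ∈ w) ∧ ∀ y w, (y, w) ∈ l → q ∈ w → pvLe k x y

-- the outer loop of B: the best map after processing 'done ++ rest' from a state correct for 'done'
theorem best_fold_char (k : String → Int) :
    ∀ (rest done : List (String × List String)) (b : PySem.Dict String String),
      (∀ q, (b.get? q = none → ∀ y w, (y, w) ∈ done → q ∉ w) ∧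
            (∀ x, b.get? q = some x → pvBestOf k done q x)) →
      ∀ q, ((rest.foldl (fun b kv => kv.2.foldl (fun b p => pvAssignStep k b kv.1 p) b) b).get? q
              = none → ∀ y w, (y, w) ∈ done ++ rest → q ∉ w) ∧
           (∀ x, (rest.foldl (fun b kv => kv.2.foldl (fun b p => pvAssignStep k b kv.1 p) b) b).get? q
              = some x → pvBestOf k (done ++ rest) q x) := by
  intro rest
  induction rest with
  | nil => intro done b h q; simpa using h q
  | cons kv rest ih =>
    intro done b h q
    rw [List.foldl_cons]
    have hmain := ih (done ++ [kv]) (kv.2.foldl (fun b p => pvAssignStep k b kv.1 p) b) ?_ q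
    · simpa using hmain
    · intro q'
      rw [assign_fold_get? k kv.1 kv.2 b q']
      by_cases hq : q' ∈ kv.2
      · rw [if_pos hq]
        cases hb : b.get? q' with
        | none =>
          constructor
          · intro hcontra; exact absurd hcontra (by simp [pvOneStep])
          · intro x hx
            simp only [pvOneStep, Option.some.injEq] at hx
            subst hx
            constructor
            · exact ⟨kv.2, by simp, hq⟩
            · intro y w hyw hqw
              rcases List.mem_append.mp hyw with hyw | hyw
              · exact absurd hqw ((h q').1 hb y w hyw)
              · simp only [List.mem_singleton, Prod.ext_iff] at hyw
                rcases hyw with ⟨h1, _⟩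
                rw [h1]
                exact pvLe_refl k kv.1
        | some cur =>
          have hbest := (h q').2 cur hb
          simp only [pvOneStep]
          by_cases hlt : k kv.1 < k cur ∨ (k kv.1 = k cur ∧ kv.1 < cur)
          · rw [if_pos hlt]
            constructor
            · intro hcontra; exact absurd hcontra (by simp)
            · intro x hx
              simp only [Option.some.injEq] at hx
              subst hx
              constructor
              · exact ⟨kv.2, by simp, hq⟩
              · intro y w hyw hqw
                rcases List.mem_append.mp hyw with hyw | hyw
                · exact pvLe_trans (pvLt_to_pvLe hlt) (hbest.2 y w hyw hqw)
                · simp only [List.mem_singleton, Prod.ext_iff] at hyw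
                  rcases hyw with ⟨h1, _⟩
                  rw [h1]
                  exact pvLe_refl k kv.1
          · rw [if_neg hlt]
            constructor
            · intro hcontra; exact absurd hcontra (by simp)
            · intro x hx
              simp only [Option.some.injEq] at hx
              subst hx
              constructor
              · exact ⟨hbest.1.choose, List.mem_append.mpr (Or.inl hbest.1.choose_spec.1),
                  hbest.1.choose_spec.2⟩
              · intro y w hyw hqw
                rcases List.mem_append.mp hyw with hyw | hyw
                · exact hbest.2 y w hyw hqw
                · simp only [List.mem_singleton, Prod.ext_iff] at hyw
                  rcases hyw with ⟨h1, _⟩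
                  rw [h1]
                  exact not_pvLt_iff.mp hlt
      · rw [if_neg hq]
        constructor
        · intro hnone y w hyw
          rcases List.mem_append.mp hyw with hyw | hyw
          · exact (h q').1 hnone y w hyw
          · simp only [List.mem_singleton, Prod.ext_iff] at hyw
            rcases hyw with ⟨_, h2⟩
            rw [h2]
            exact hq
        · intro x hx
          have hbest := (h q').2 x hx
          constructor
          · exact ⟨hbest.1.choose, List.mem_append.mpr (Or.inl hbest.1.choose_spec.1),
              hbest.1.choose_spec.2⟩
          · intro y w hyw hqw
            rcases List.mem_append.mp hyw with hyw | hyw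
            · exact hbest.2 y w hyw hqw
            · simp only [List.mem_singleton, Prod.ext_iff] at hyw
              rcases hyw with ⟨_, h2⟩
              rw [h2] at hqw
              exact absurd hqw hq

-- getD on a member of a nodup-keyed dict is its stored value
theorem getD_of_mem_items' (dd : PySem.Dict String (List String)) {x : String} {w : List String}
    (hmem : (x, w) ∈ dd.items) (hnd : dd.keys.Nodup) : dd.getD x [] = w := by
  have := PySem.Dict.get?_of_mem_items dd hmem hnd
  simp [PySem.Dict.getD, this]

theorem mem_keys_iff (dd : PySem.Dict String (List String)) (x : String) :
    x ∈ dd.keys ↔ ∃ w, (x, w) ∈ dd.items := by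
  simp only [PySem.Dict.keys]
  constructor
  · intro hx
    obtain ⟨p, hp, he⟩ := List.mem_map.mp hx
    refine ⟨p.2, ?_⟩
    rw [← he]
    exact hp
  · rintro ⟨w, hw⟩
    exact List.mem_map.mpr ⟨(x, w), hw, rfl⟩

-- main generalized fold equality: A's stateful walk over L = B's emit pass over L
theorem fold_eq (k : String → Int) (dd : PySem.Dict String (List String))
    (best : PySem.Dict String String) (hnd : dd.keys.Nodup)
    (hchar : ∀ q, (best.get? q = none → ∀ y w, (y, w) ∈ dd.items → q ∉ w) ∧
                  (∀ x, best.get? q = some x → pvBestOf k dd.items q x)) :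
    ∀ (L : List String) (res : PySem.Dict String (List String)) (asg : PySem.Set String),
      L.Pairwise (pvLt k) →
      (∀ x ∈ L, x ∈ dd.keys) →
      (∀ q, q ∈ asg ↔ ∃ x, x ∈ dd.keys ∧ x ∉ L ∧ q ∈ dd.getD x []) →
      (∀ y, y ∈ dd.keys → y ∉ L → ∀ x ∈ L, pvLt k y x) →
      (L.foldl (pvAStep dd) (res, asg)).1 = L.foldl (pvEmitStep dd best) res := by
  intro L
  induction L with
  | nil => intro res asg _ _ _ _; simp
  | cons date L ih =>
    intro res asg hpair hsub hasg hord
    have hdk : date ∈ dd.keys := hsub date List.mem_cons_self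
    obtain ⟨wd, hwd⟩ := (mem_keys_iff dd date).mp hdk
    have hgetd : dd.getD date [] = wd := getD_of_mem_items' dd hwd hnd
    have hdL : date ∉ L := by
      intro hmem
      exact pvLt_irrefl ((List.pairwise_cons.mp hpair).1 date hmem)
    -- pointwise equality of A's 'available' filter and B's 'winners' filter on this date
    have hfilt : ∀ p ∈ dd.getD date [], (!(PySem.Set.contains asg p)) = (best.get? p == some date) := by
      intro p hp
      have hpw : p ∈ wd := hgetd ▸ hp
      -- best.get? p is some x for some x (date's entry witnesses non-none)
      cases hbp : best.get? p with
      | none => exact absurd hpw ((hchar p).1 hbp date wd hwd)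
      | some x =>
        have hbest := (hchar p).2 x hbp
        rw [Bool.eq_iff_iff]
        simp only [Bool.not_eq_true', beq_iff_eq, Option.some.injEq]
        constructor
        · -- p unassigned so far → its best date is exactly 'date'
          intro hnc
          have hnasg : p ∉ asg := by
            intro hmem
            have h1 : PySem.Set.contains asg p = true := List.contains_iff_mem.mpr hmem
            rw [h1] at hnc
            exact Bool.noConfusion hnc
          obtain ⟨wx, hwx, hpwx⟩ := hbest.1
          have hxk : x ∈ dd.keys := (mem_keys_iff dd x).mpr ⟨wx, hwx⟩
          have hgx : dd.getD x [] = wx := getD_of_mem_items' dd hwx hnd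
          by_cases hxL : x ∈ date :: L
          · rcases List.mem_cons.mp hxL with rfl | hxL'
            · rfl
            · have h1 : pvLt k date x := (List.pairwise_cons.mp hpair).1 x hxL'
              have h2 : pvLe k x date := hbest.2 date wd hwd hpw
              exact absurd h2 (fun h => pvLt_pvLe_asymm h1 h)
          · exact absurd ((hasg p).mpr ⟨x, hxk, hxL, hgx ▸ hpwx⟩) hnasg
        · -- p's best date is 'date' → p not yet assigned
          intro hx
          rw [hx] at hbest
          by_contra hc
          have hct : PySem.Set.contains asg p = true := by
            cases hcc : PySem.Set.contains asg p with
            | false => exact absurd hcc hc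
            | true => rfl
          have hpasg : p ∈ asg := List.contains_iff_mem.mp hct
          obtain ⟨x0, hx0k, hx0L, hpx0⟩ := (hasg p).mp hpasg
          obtain ⟨w0, hw0⟩ := (mem_keys_iff dd x0).mp hx0k
          have hg0 : dd.getD x0 [] = w0 := getD_of_mem_items' dd hw0 hnd
          have h1 : pvLt k x0 date := hord x0 hx0k hx0L date List.mem_cons_self
          have h2 : pvLe k date x0 := hbest.2 x0 w0 hw0 (hg0 ▸ hpx0)
          exact pvLt_pvLe_asymm h1 h2
    have hgroup_eq : PySem.Set.diff (dd.getD date []) asg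
        = (dd.getD date []).filter (fun p => best.get? p == some date) := by
      show (dd.getD date []).filter (fun x => !(PySem.Set.contains asg x)) = _
      exact List.filter_congr hfilt
    rw [List.foldl_cons, List.foldl_cons]
    -- the two step results
    set g := (dd.getD date []).filter (fun p => best.get? p == some date) with hg
    have hAstep : pvAStep dd (res, asg) date =
        (if g ≠ [] then (res.insert date g, PySem.Set.update asg g) else (res, asg)) := by
      unfold pvAStep
      rw [hgroup_eq]
    have hBstep : pvEmitStep dd best res date = (if g ≠ [] then res.insert date g else res) := by
      unfold pvEmitStep
      rfl
    have hordL : ∀ y, y ∈ dd.keys → y ∉ L → ∀ x ∈ L, pvLt k y x := by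
      intro y hyk hyL x hxL
      by_cases hyd : y = date
      · subst hyd
        exact (List.pairwise_cons.mp hpair).1 x hxL
      · exact hord y hyk (by simp [hyL, hyd]) x (List.mem_cons_of_mem _ hxL)
    by_cases hge : g ≠ []
    · rw [hAstep, hBstep, if_pos hge, if_pos hge]
      apply ih
      · exact (List.pairwise_cons.mp hpair).2
      · intro x hx; exact hsub x (List.mem_cons_of_mem _ hx)
      · intro q
        rw [PySem.Set.mem_update]
        constructor
        · rintro (hq | hq)
          · obtain ⟨x, hxk, hxL, hqx⟩ := (hasg q).mp hq
            exact ⟨x, hxk, fun h => hxL (List.mem_cons_of_mem _ h), hqx⟩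
          · have hq' : q ∈ dd.getD date [] := List.mem_of_mem_filter hq
            exact ⟨date, hdk, hdL, hq'⟩
        · rintro ⟨x, hxk, hxL, hqx⟩
          by_cases hxd : x = date
          · subst hxd
            by_cases hqa : q ∈ asg
            · exact Or.inl hqa
            · refine Or.inr ?_
              rw [← hgroup_eq]
              exact (PySem.Set.mem_diff _ _ _).mpr ⟨hqx, hqa⟩
          · exact Or.inl ((hasg q).mpr ⟨x, hxk, by simp [hxL, hxd], hqx⟩)
      · exact hordL
    · rw [hAstep, hBstep, if_neg hge, if_neg hge]
      apply ih
      · exact (List.pairwise_cons.mp hpair).2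
      · intro x hx; exact hsub x (List.mem_cons_of_mem _ hx)
      · intro q
        rw [hasg q]
        constructor
        · rintro ⟨x, hxk, hxL, hqx⟩
          exact ⟨x, hxk, fun h => hxL (List.mem_cons_of_mem _ h), hqx⟩
        · rintro ⟨x, hxk, hxL, hqx⟩
          by_cases hxd : x = date
          · subst hxd
            -- g = [] means every person of this date is already assigned
            have hge' : g = [] := of_not_not hge
            have hnotg : q ∉ g := by rw [hge']; exact List.not_mem_nil
            have hq_in_asg : q ∈ asg := by
              by_contra hqa
              exact hnotg (hgroup_eq ▸ (PySem.Set.mem_diff _ _ _).mpr ⟨hqx, hqa⟩)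
            exact (hasg q).mp hq_in_asg
          · exact ⟨x, hxk, by simp [hxL, hxd], hqx⟩
      · exact hordL

-- ===== VERDICT (by name: the statement is the Claim_ definition above) =====
theorem schedule_slots_spec : Claim_equal_schedule_slots := by
  intro d _
  show schedule_slots d = schedule_slots_alt d
  unfold schedule_slots schedule_slots_alt
  have hnd : (pvDict d).keys.Nodup := PySem.Dict.nodup_keys_ofList _
  have hchar : ∀ q,
      (((pvDict d).items.foldl
          (fun b kv => kv.2.foldl (fun b p => pvAssignStep (pvKey d) b kv.1 p) b)
          PySem.Dict.empty).get? q = none → ∀ y w, (y, w) ∈ (pvDict d).items → q ∉ w) ∧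
      (∀ x, ((pvDict d).items.foldl
          (fun b kv => kv.2.foldl (fun b p => pvAssignStep (pvKey d) b kv.1 p) b)
          PySem.Dict.empty).get? q = some x → pvBestOf (pvKey d) (pvDict d).items q x) := by
    have h0 : ∀ q, ((PySem.Dict.empty : PySem.Dict String String).get? q = none →
        ∀ y w, (y, w) ∈ ([] : List (String × List String)) → q ∉ w) ∧
        (∀ x, (PySem.Dict.empty : PySem.Dict String String).get? q = some x →
          pvBestOf (pvKey d) [] q x) := by
      intro q
      constructor
      · intro _ y w hyw; exact absurd hyw (List.not_mem_nil)
      · intro x hx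
        rw [PySem.Dict.get?_empty] at hx
        exact absurd hx (by simp)
    have := best_fold_char (pvKey d) (pvDict d).items [] PySem.Dict.empty h0
    simpa using this
  have hperm := PySem.List.sorted2_perm (pvDict d).keys (pvKey d) (fun x => x) false
  have hpair : (PySem.List.sorted2 (pvDict d).keys (pvKey d) (fun x => x) false).Pairwise
      (pvLt (pvKey d)) := sorted2_pairwise_pvLt (pvKey d) (pvDict d).keys hnd
  have hsub : ∀ x ∈ PySem.List.sorted2 (pvDict d).keys (pvKey d) (fun x => x) false,
      x ∈ (pvDict d).keys := fun x hx => hperm.mem_iff.mp hx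
  have hasg : ∀ q, q ∈ (PySem.Set.empty : PySem.Set String) ↔
      ∃ x, x ∈ (pvDict d).keys ∧
        x ∉ PySem.List.sorted2 (pvDict d).keys (pvKey d) (fun x => x) false ∧
        q ∈ (pvDict d).getD x [] := by
    intro q
    constructor
    · intro h; exact absurd h (List.not_mem_nil)
    · rintro ⟨x, hxk, hxS, _⟩; exact absurd (hperm.mem_iff.mpr hxk) hxS
  have hord : ∀ y, y ∈ (pvDict d).keys →
      y ∉ PySem.List.sorted2 (pvDict d).keys (pvKey d) (fun x => x) false →
      ∀ x ∈ PySem.List.sorted2 (pvDict d).keys (pvKey d) (fun x => x) false,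
        pvLt (pvKey d) y x :=
    fun y hy hyS _ _ => absurd (hperm.mem_iff.mpr hy) hyS
  exact congrArg PySem.Dict.items
    (fold_eq (pvKey d) (pvDict d) _ hnd hchar
      (PySem.List.sorted2 (pvDict d).keys (pvKey d) (fun x => x) false)
      PySem.Dict.empty PySem.Set.empty hpair hsub hasg hord)
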